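-- pv_equiv track=rewrite | github.com/lloydwyl97/mystic-codebase- | mystic_ui/ui/data_adapter.py | to_dash_symbol
-- ===== SOURCE A (Python) =====
-- from typing import Any, Dict, List, Optional, Mapping, Sequence, cast
--
-- def to_dash_symbol(symbol: str) -> str:
--     """
--     Convert common exchange symbols to dashboard format.
--     Examples:
--       "BTCUSDT" -> "BTC-USD"
--       "ETHUSD"  -> "ETH-USD"
--       "ada-usdt" -> "ADA-USD"
--     """
--     s = str(symbol or "").upper().replace(" ", "").replace("_", "").replace("-", "")
--     if not s:
--         return ""
--
--     # Explicit top mappings (extendable)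
--     explicit: Dict[str, str] = {
--         "BTCUSDT": "BTC-USD",
--         "ETHUSDT": "ETH-USD",
--         "BNBUSDT": "BNB-USD",
--         "ADAUSDT": "ADA-USD",
--         "SOLUSDT": "SOL-USD",
--         "XRPUSDT": "XRP-USD",
--         "DOGEUSDT": "DOGE-USD",
--         "DOTUSDT": "DOT-USD",
--         "MATICUSDT": "MATIC-USD",
--         "LTCUSDT": "LTC-USD",
--         "SHIBUSDT": "SHIB-USD",
--         # USD-quoted direct
--         "BTCUSD": "BTC-USD",
--         "ETHUSD": "ETH-USD",
--         "BNBUSD": "BNB-USD",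
--         "ADAUSD": "ADA-USD",
--         "SOLUSD": "SOL-USD",
--         "XRPUSD": "XRP-USD",
--         "DOGEUSD": "DOGE-USD",
--         "DOTUSD": "DOT-USD",
--         "MATICUSD": "MATIC-USD",
--         "LTCUSD": "LTC-USD",
--         "SHIBUSD": "SHIB-USD",
--     }
--     if s in explicit:
--         return explicit[s]
--
--     # Generic rule: map XXXUSDT or XXXUSD -> XXX-USD; otherwise, try to split base/quote
--     if s.endswith("USDT"):
--         base = s[:-4]
--         return f"{base}-USD"
--     if s.endswith("USD"):
--         base = s[:-3]
--         return f"{base}-USD"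
--
--     # If no common quote, best-effort: insert dash before last 3 or 4 if that looks like a fiat/known suffix
--     for q in ("USD", "USDT", "USDC", "EUR", "GBP"):
--         if s.endswith(q):
--             base = s[: -len(q)]
--             # Normalize all to USD for dashboard unless explicitly non-USD
--             mapped_quote = "USD" if q in ("USD", "USDT", "USDC") else q
--             return f"{base}-{mapped_quote}"
--
--     # Fallback: if already contained a dash originally, return upper-dashed form
--     if "-" in str(symbol):
--         parts = str(symbol).replace(" ", "").replace("_", "-").upper().split("-")
--         if len(parts) >= 2:
--             return f"{parts[0]}-USD" if parts[1] in ("USDT", "USDC") else f"{parts[0]}-{parts[1]}"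
--
--     # Last resort: return as base-USD with entire input as base
--     return f"{s}-USD"
-- ===== SOURCE B (Python) =====
-- def to_dash_symbol(symbol: str) -> str:
--     s = str(symbol or "").upper().replace(" ", "").replace("_", "").replace("-", "")
--     if not s:
--         return ""
--
--     # One ordered suffix table replaces the explicit dict (every entry of which
--     # already equals what the suffix rules produce) and the three suffix scans.
--     for suffix, quote in (("USDT", "USD"), ("USD", "USD"), ("USDC", "USD"),
--                           ("EUR", "EUR"), ("GBP", "GBP")):
--         if s.endswith(suffix):
--             return f"{s[:-len(suffix)]}-{quote}"
--
--     # Fallback: if already contained a dash originally, return upper-dashed form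
--     if "-" in str(symbol):
--         parts = str(symbol).replace(" ", "").replace("_", "-").upper().split("-")
--         if len(parts) >= 2:
--             return f"{parts[0]}-USD" if parts[1] in ("USDT", "USDC") else f"{parts[0]}-{parts[1]}"
--
--     return f"{s}-USD"
-- ===== Notes on version B (the rewrite author's own statement) =====
-- stated objective: simpler
-- what changed: Dropped the 22-entry explicit dict and the two separate endswith checks (all redundant with the generic suffix rules) and replaced them with a single ordered (suffix, quote) table scanned once; the dash fallback and last resort are kept verbatim.
import Mathlib
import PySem

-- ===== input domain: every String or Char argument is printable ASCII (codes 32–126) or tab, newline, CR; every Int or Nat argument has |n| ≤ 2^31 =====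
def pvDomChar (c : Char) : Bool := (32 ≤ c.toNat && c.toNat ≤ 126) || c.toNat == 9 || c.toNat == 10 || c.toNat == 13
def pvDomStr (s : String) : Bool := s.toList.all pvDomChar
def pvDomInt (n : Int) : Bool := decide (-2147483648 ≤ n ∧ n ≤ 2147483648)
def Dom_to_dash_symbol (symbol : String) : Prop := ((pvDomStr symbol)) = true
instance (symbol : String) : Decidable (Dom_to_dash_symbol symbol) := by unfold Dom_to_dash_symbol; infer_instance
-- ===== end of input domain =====

-- B drops A's redundant explicit dict and separate endswith checks in favour of one ordered
-- (suffix, quote) table scanned once (objective: simpler); return values agree on all inputs.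

-- ===== PORT A =====

-- the `explicit` dict literal of A (insertion order kept)
def pvExplicit : PySem.Dict (List Char) (List Char) := PySem.Dict.mk
  [ ("BTCUSDT".toList, "BTC-USD".toList), ("ETHUSDT".toList, "ETH-USD".toList),
    ("BNBUSDT".toList, "BNB-USD".toList), ("ADAUSDT".toList, "ADA-USD".toList),
    ("SOLUSDT".toList, "SOL-USD".toList), ("XRPUSDT".toList, "XRP-USD".toList),
    ("DOGEUSDT".toList, "DOGE-USD".toList), ("DOTUSDT".toList, "DOT-USD".toList),
    ("MATICUSDT".toList, "MATIC-USD".toList), ("LTCUSDT".toList, "LTC-USD".toList),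
    ("SHIBUSDT".toList, "SHIB-USD".toList),
    ("BTCUSD".toList, "BTC-USD".toList), ("ETHUSD".toList, "ETH-USD".toList),
    ("BNBUSD".toList, "BNB-USD".toList), ("ADAUSD".toList, "ADA-USD".toList),
    ("SOLUSD".toList, "SOL-USD".toList), ("XRPUSD".toList, "XRP-USD".toList),
    ("DOGEUSD".toList, "DOGE-USD".toList), ("DOTUSD".toList, "DOT-USD".toList),
    ("MATICUSD".toList, "MATIC-USD".toList), ("LTCUSD".toList, "LTC-USD".toList),
    ("SHIBUSD".toList, "SHIB-USD".toList) ]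

-- A's `for q in ("USD","USDT","USDC","EUR","GBP")` loop
def pvQuoteLoopA (s : List Char) : List (List Char) → Option String
  | [] => none
  | q :: rest =>
    if PySem.Chars.endswith s q then
      some (String.ofList (PySem.Chars.slice s none (some (-(q.length : Int))) ++
        '-' :: (if q == "USD".toList || q == "USDT".toList || q == "USDC".toList
                then "USD".toList else q)))
    else pvQuoteLoopA s rest

-- A's trailing dash-fallback and last-resort lines
def pvFallbackA (symbol : String) (s : List Char) : String :=
  if PySem.Chars.isIn ['-'] symbol.toList then
    let parts := PySem.Chars.splitOn
      (PySem.Chars.upper (PySem.Chars.replace (PySem.Chars.replace symbol.toList [' '] []) ['_'] ['-'])) ['-']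
    if 2 ≤ parts.length then
      let p1 := parts.getD 1 []
      if p1 == "USDT".toList || p1 == "USDC".toList then
        String.ofList (parts.getD 0 [] ++ "-USD".toList)
      else
        String.ofList (parts.getD 0 [] ++ '-' :: p1)
    else String.ofList (s ++ "-USD".toList)
  else String.ofList (s ++ "-USD".toList)

def to_dash_symbol (symbol : String) : String :=
  let s := PySem.Chars.replace (PySem.Chars.replace
    (PySem.Chars.replace (PySem.Chars.upper symbol.toList) [' '] []) ['_'] []) ['-'] []
  if s = [] then "" else
  match pvExplicit.get? s with
  | some v => String.ofList v
  | none =>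
    if PySem.Chars.endswith s "USDT".toList then
      String.ofList (PySem.Chars.slice s none (some (-4)) ++ "-USD".toList)
    else if PySem.Chars.endswith s "USD".toList then
      String.ofList (PySem.Chars.slice s none (some (-3)) ++ "-USD".toList)
    else
      match pvQuoteLoopA s ["USD".toList, "USDT".toList, "USDC".toList, "EUR".toList, "GBP".toList] with
      | some r => r
      | none => pvFallbackA symbol s

-- ===== PORT B =====

-- B's single ordered (suffix, mapped_quote) table loop
def pvSuffixLoop (s : List Char) : List (List Char × List Char) → Option String
  | [] => none
  | (suf, quote) :: rest =>
    if PySem.Chars.endswith s suf then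
      some (String.ofList (PySem.Chars.slice s none (some (-(suf.length : Int))) ++ '-' :: quote))
    else pvSuffixLoop s rest

-- B's dash-fallback and last-resort lines (kept verbatim from A)
def pvFallbackB (symbol : String) (s : List Char) : String :=
  if PySem.Chars.isIn ['-'] symbol.toList then
    let parts := PySem.Chars.splitOn
      (PySem.Chars.upper (PySem.Chars.replace (PySem.Chars.replace symbol.toList [' '] []) ['_'] ['-'])) ['-']
    if 2 ≤ parts.length then
      let p1 := parts.getD 1 []
      if p1 == "USDT".toList || p1 == "USDC".toList then
        String.ofList (parts.getD 0 [] ++ "-USD".toList)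
      else
        String.ofList (parts.getD 0 [] ++ '-' :: p1)
    else String.ofList (s ++ "-USD".toList)
  else String.ofList (s ++ "-USD".toList)

def to_dash_symbol_alt (symbol : String) : String :=
  let s := PySem.Chars.replace (PySem.Chars.replace
    (PySem.Chars.replace (PySem.Chars.upper symbol.toList) [' '] []) ['_'] []) ['-'] []
  if s = [] then "" else
  match pvSuffixLoop s [("USDT".toList, "USD".toList), ("USD".toList, "USD".toList),
                        ("USDC".toList, "USD".toList), ("EUR".toList, "EUR".toList),
                        ("GBP".toList, "GBP".toList)] with
  | some r => r
  | none => pvFallbackB symbol s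

-- ===== PRECONDITION & SPEC =====
def Spec_to_dash_symbol (symbol : String) (out : String) : Prop := out = to_dash_symbol_alt symbol
instance (symbol : String) (out : String) : Decidable (Spec_to_dash_symbol symbol out) := by unfold Spec_to_dash_symbol; infer_instance

-- ===== CLAIM (what is proved, stated in full; the proofs are below) =====
def Claim_equal_to_dash_symbol : Prop := ∀ (symbol : String), Dom_to_dash_symbol symbol → Spec_to_dash_symbol symbol (to_dash_symbol symbol)

-- ===== LEMMAS AND PROOFS =====

-- every value of A's explicit dict is exactly what B's suffix table produces for its key
lemma pv_dict_hit (s v : List Char) (h : pvExplicit.get? s = some v) :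
    pvSuffixLoop s [("USDT".toList, "USD".toList), ("USD".toList, "USD".toList),
                    ("USDC".toList, "USD".toList), ("EUR".toList, "EUR".toList),
                    ("GBP".toList, "GBP".toList)] = some (String.ofList v) := by
  simp only [PySem.Dict.get?, Option.map_eq_some_iff] at h
  obtain ⟨p, hfind, hv⟩ := h
  have hmem := List.mem_of_find?_eq_some hfind
  have hb := List.find?_some hfind
  have hps : p.1 = s := by simpa using hb
  have hall : ∀ q ∈ pvExplicit.items,
      pvSuffixLoop q.1 [("USDT".toList, "USD".toList), ("USD".toList, "USD".toList),
                        ("USDC".toList, "USD".toList), ("EUR".toList, "EUR".toList),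
                        ("GBP".toList, "GBP".toList)] = some (String.ofList q.2) := by decide
  rw [← hps, ← hv]
  exact hall p hmem

-- A's endswith chain + quote loop agrees with B's single table loop
lemma pv_chain_eq (symbol : String) (s : List Char) :
    (if PySem.Chars.endswith s "USDT".toList then
      String.ofList (PySem.Chars.slice s none (some (-4)) ++ "-USD".toList)
    else if PySem.Chars.endswith s "USD".toList then
      String.ofList (PySem.Chars.slice s none (some (-3)) ++ "-USD".toList)
    else
      match pvQuoteLoopA s ["USD".toList, "USDT".toList, "USDC".toList, "EUR".toList, "GBP".toList] with
      | some r => r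
      | none => pvFallbackA symbol s)
    = match pvSuffixLoop s [("USDT".toList, "USD".toList), ("USD".toList, "USD".toList),
                            ("USDC".toList, "USD".toList), ("EUR".toList, "EUR".toList),
                            ("GBP".toList, "GBP".toList)] with
      | some r => r
      | none => pvFallbackB symbol s := by
  by_cases h1 : PySem.Chars.endswith s ['U', 'S', 'D', 'T']
  · simp [pvSuffixLoop, h1]
  · by_cases h2 : PySem.Chars.endswith s ['U', 'S', 'D']
    · simp [pvSuffixLoop, h1, h2]
    · simp [pvQuoteLoopA, pvSuffixLoop, h1, h2]
      split_ifs <;> rfl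

-- ===== VERDICT (by name: the statement is the Claim_ definition above) =====
theorem to_dash_symbol_spec : Claim_equal_to_dash_symbol := by
  intro symbol _
  show to_dash_symbol symbol = to_dash_symbol_alt symbol
  unfold to_dash_symbol to_dash_symbol_alt
  generalize (PySem.Chars.replace (PySem.Chars.replace
    (PySem.Chars.replace (PySem.Chars.upper symbol.toList) [' '] []) ['_'] []) ['-'] []) = s
  by_cases hs0 : s = []
  · simp [hs0]
  · rw [if_neg hs0, if_neg hs0]
    cases hd : pvExplicit.get? s with
    | some v => rw [pv_dict_hit s v hd]
    | none => exact pv_chain_eq symbol s
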